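-- pv_equiv track=rewrite | github.com/jdziergwa/job-radar | api/wizard_helpers.py | _split_markdown_level2_sections
-- ===== SOURCE A (Python) =====
-- def _split_markdown_level2_sections(doc: str) -> tuple[list[str], list[tuple[str, str]]]:
--     """Split markdown into preamble lines and ordered level-2 sections."""
--     preamble: list[str] = []
--     sections: list[tuple[str, str]] = []
--     current_heading: str | None = None
--     current_lines: list[str] = []
--
--     for line in doc.splitlines():
--         if line.startswith("## "):
--             if current_heading is None:
--                 pass
--             else:
--                 sections.append((current_heading, "\n".join(current_lines).strip()))
--             current_heading = line[3:].strip()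
--             current_lines = []
--             continue
--
--         if current_heading is None:
--             preamble.append(line)
--         else:
--             current_lines.append(line)
--
--     if current_heading is not None:
--         sections.append((current_heading, "\n".join(current_lines).strip()))
--
--     return preamble, sections
-- ===== SOURCE B (Python) =====
-- def _break(lines):
--     """Split lines at the first level-2 heading: (before, from-heading-on)."""
--     for k, line in enumerate(lines):
--         if line.startswith("## "):
--             return lines[:k], lines[k:]
--     return lines, []
--
--
-- def _sections(rest):
--     """rest starts with a heading line (or is empty); slice out each section."""
--     out = []
--     while rest:
--         body, rest2 = _break(rest[1:])
--         out.append((rest[0][3:].strip(), "\n".join(body).strip()))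
--         rest = rest2
--     return out
--
--
-- def _split_markdown_level2_sections(doc: str) -> tuple[list[str], list[tuple[str, str]]]:
--     lines = doc.splitlines()
--     preamble, rest = _break(lines)
--     return preamble, _sections(rest)
-- ===== Notes on version B (the rewrite author's own statement) =====
-- stated objective: simpler
-- what changed: Replaced the stateful single-pass accumulator (current_heading/current_lines with a trailing flush) by a two-phase break-at-next-heading decomposition: split off the preamble, then repeatedly slice each section's body up to the next heading.
import Mathlib
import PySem

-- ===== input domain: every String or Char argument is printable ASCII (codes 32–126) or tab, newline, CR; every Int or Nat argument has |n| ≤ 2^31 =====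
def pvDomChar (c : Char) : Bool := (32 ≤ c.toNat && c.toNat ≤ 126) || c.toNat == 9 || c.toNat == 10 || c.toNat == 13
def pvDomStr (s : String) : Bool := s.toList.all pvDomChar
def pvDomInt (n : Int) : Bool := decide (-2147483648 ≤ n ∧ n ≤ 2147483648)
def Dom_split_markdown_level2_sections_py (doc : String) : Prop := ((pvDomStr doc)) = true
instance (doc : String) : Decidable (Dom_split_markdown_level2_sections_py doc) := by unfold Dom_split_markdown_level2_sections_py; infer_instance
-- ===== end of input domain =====

-- B replaces A's stateful accumulator by a break-at-next-heading two-phase decomposition (objective: simpler).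

-- ===== PORT A =====
-- the loop over doc.splitlines() with state (preamble, sections, current_heading, current_lines)
def pvLoopA (lines : List String) (preamble : List String)
    (sections : List (String × String)) (curH : Option String) (curLines : List String) :
    List String × List (String × String) :=
  match lines, curH with
  | [], none => (preamble, sections)
  | [], some h => (preamble, sections ++ [(h, PySem.Str.strip (PySem.Str.join "\n" curLines))])
  | line :: rest, curH =>
    if PySem.Str.startswith line "## " then
      match curH with
      | none =>
          pvLoopA rest preamble sections
            (some (PySem.Str.strip (PySem.Str.slice line (some 3) none))) []
      | some h =>
          pvLoopA rest preamble
            (sections ++ [(h, PySem.Str.strip (PySem.Str.join "\n" curLines))])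
            (some (PySem.Str.strip (PySem.Str.slice line (some 3) none))) []
    else
      match curH with
      | none => pvLoopA rest (preamble ++ [line]) sections none curLines
      | some h => pvLoopA rest preamble sections (some h) (curLines ++ [line])

def split_markdown_level2_sections_py (doc : String) : List String × (List (String × String)) :=
  pvLoopA (PySem.Str.splitlines doc) [] [] none []

-- ===== PORT B =====
-- _break: split lines at the first level-2 heading
def pvBreakB (lines : List String) : List String × List String :=
  match lines with
  | [] => ([], [])
  | line :: rest =>
    if PySem.Str.startswith line "## " then ([], line :: rest)
    else
      let (a, b) := pvBreakB rest
      (line :: a, b)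

theorem pvBreakB_snd_len_le (lines : List String) : (pvBreakB lines).2.length ≤ lines.length := by
  induction lines with
  | nil => simp [pvBreakB]
  | cons l rest ih =>
    simp only [pvBreakB]
    split
    · simp
    · simpa using Nat.le_succ_of_le ih

-- _sections: rest starts with a heading line (or is empty); slice out each section
def pvSectionsB (rest : List String) : List (String × String) :=
  match rest with
  | [] => []
  | h :: tl =>
    (PySem.Str.strip (PySem.Str.slice h (some 3) none),
     PySem.Str.strip (PySem.Str.join "\n" (pvBreakB tl).1)) :: pvSectionsB (pvBreakB tl).2
termination_by rest.length
decreasing_by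
  have := pvBreakB_snd_len_le tl
  simp only [List.length_cons]; omega

def split_markdown_level2_sections_py_alt (doc : String) : List String × (List (String × String)) :=
  let lines := PySem.Str.splitlines doc
  let pr := pvBreakB lines
  (pr.1, pvSectionsB pr.2)

-- ===== PRECONDITION & SPEC =====
def Spec_split_markdown_level2_sections_py (doc : String) (out : List String × (List (String × String))) : Prop := out = split_markdown_level2_sections_py_alt doc
instance (doc : String) (out : List String × (List (String × String))) : Decidable (Spec_split_markdown_level2_sections_py doc out) := by unfold Spec_split_markdown_level2_sections_py; infer_instance

-- ===== CLAIM (what is proved, stated in full; the proofs are below) =====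
def Claim_equal_split_markdown_level2_sections_py : Prop := ∀ (doc : String), Dom_split_markdown_level2_sections_py doc → Spec_split_markdown_level2_sections_py doc (split_markdown_level2_sections_py doc)

-- ===== LEMMAS AND PROOFS =====

-- in the heading state, the loop emits the pending section (body = curLines ++ lines up to
-- the next heading) and then exactly B's sections of the remainder
theorem pvLoopA_some (lines : List String) :
    ∀ (pre : List String) (secs : List (String × String)) (h : String) (cl : List String),
    pvLoopA lines pre secs (some h) cl =
      (pre, secs ++ (h, PySem.Str.strip (PySem.Str.join "\n" (cl ++ (pvBreakB lines).1)))
        :: pvSectionsB (pvBreakB lines).2) := by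
  induction lines with
  | nil => intro pre secs h cl; simp [pvLoopA, pvBreakB, pvSectionsB]
  | cons line rest ih =>
    intro pre secs h cl
    simp only [pvLoopA]
    by_cases hl : PySem.Str.startswith line "## " = true
    · simp only [hl, if_true, ih, pvBreakB, pvSectionsB]
      simp
    · simp only [hl, if_false, Bool.false_eq_true, ih, pvBreakB]
      simp

-- in the no-heading state the loop accumulates the preamble up to the first heading,
-- then hands over to the heading state
theorem pvLoopA_none (lines : List String) :
    ∀ (pre : List String) (secs : List (String × String)) (cl : List String),
    pvLoopA lines pre secs none cl =
      (pre ++ (pvBreakB lines).1, secs ++ pvSectionsB (pvBreakB lines).2) := by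
  induction lines with
  | nil => intro pre secs cl; simp [pvLoopA, pvBreakB, pvSectionsB]
  | cons line rest ih =>
    intro pre secs cl
    simp only [pvLoopA]
    by_cases hl : PySem.Str.startswith line "## " = true
    · simp only [hl, if_true, pvLoopA_some, pvBreakB]
      simp [pvSectionsB]
    · simp only [hl, if_false, Bool.false_eq_true, ih, pvBreakB]
      simp

-- ===== VERDICT (by name: the statement is the Claim_ definition above) =====
theorem split_markdown_level2_sections_py_spec : Claim_equal_split_markdown_level2_sections_py := by
  intro doc _
  show _ = _
  simp [split_markdown_level2_sections_py, split_markdown_level2_sections_py_alt, pvLoopA_none]
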